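-- pv_equiv track=rewrite | github.com/pranay-spec/Parallax-Edge | backend/app/scrapers.py | is_relevant_result
-- ===== SOURCE A (Python) =====
-- def is_relevant_result(title: str, query: str) -> bool:
--     """
--     Check if a product title is relevant to the search query.
--     Uses a multi-stage filter to ensure accurate results.
--     """
--     title_lower = title.lower()
--     query_lower = query.lower()
--
--     # Remove common filler words from query
--     stop_words = {'the', 'a', 'an', 'for', 'with', 'and', 'in', 'on', 'at', 'by', 'of', 'to'}
--     query_words = [w for w in query_lower.replace(',', ' ').replace('|', ' ').replace('-', ' ').split() if w not in stop_words and len(w) > 1]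
--
--     if not query_words:
--         return False
--
--     # 1. Critical Category Check (Hard Filter)
--     # If query has 'keyboard', but title has 'speaker', it's NOT relevant.
--     categories = {
--         'keyboard': ['keyboard', 'keypad'],
--         'mouse': ['mouse', 'mice'],
--         'speaker': ['speaker', 'soundbar', 'audio'],
--         'headphone': ['headphone', 'headset', 'earphone', 'airpod', 'earbud', 'tws'],
--         'charger': ['charger', 'adapter', 'power bank'],
--         'cable': ['cable', 'wire', 'cord', 'type-c', 'usb'],
--         'laptop': ['laptop', 'macbook', 'notebook'],
--         'phone': ['phone', 'mobile', 'smartphone'],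
--         'milk': ['milk', 'dairy', 'doodh'],
--         'bread': ['bread', 'loaf'],
--         'egg': ['egg', 'eggs', 'anda'],
--         'rice': ['rice', 'chawal'],
--         'coffee': ['coffee'],
--         'tea': ['tea', 'chai'],
--     }
--
--     # Determine the "category" of the query
--     query_categories = []
--     for cat, keywords in categories.items():
--         if any(kw in query_lower for kw in [cat] + keywords):
--             query_categories.append(cat)
--
--     # If the query is clearly for a category, ensure the title belongs to that category
--     if query_categories:
--         is_in_cat = False
--         for cat in query_categories:
--             if any(kw in title_lower for kw in [cat] + categories[cat]):
--                 is_in_cat = True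
--                 break
--
--         # Also check for "negative" categories (searching for keyboard, found speaker)
--         if not is_in_cat:
--             # Check if it belongs to a DIFFERENT category from our list
--             for other_cat, keywords in categories.items():
--                 if other_cat in query_categories: continue
--                 if any(kw in title_lower for kw in [other_cat] + keywords):
--                     return False # Found a different category than searched
--
--     # 2. Brand Check (if specified)
--     # Common brands that are also words (Apple, Boat, etc.)
--     brands = ['portronics', 'sony', 'boat', 'apple', 'samsung', 'logitech', 'zebronics', 'dell', 'hp', 'lenovo']
--     for brand in brands:
--         if brand in query_lower and brand not in title_lower:
--             # If search is for 'Sony TV' and title doesn't have 'Sony', it's risky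
--             # But we allow it if it's a very close match otherwise
--             pass
--
--     # 3. Fuzzy match / Word Overlap
--     matches = 0
--     for word in query_words:
--         if word in title_lower:
--             matches += 1
--
--     match_ratio = matches / len(query_words)
--
--     # 4. Final Verdict
--     # If we have a very long query (specific product), we need at least 30% match
--     if len(query_words) >= 5:
--         return match_ratio >= 0.3 or matches >= 3
--     # For medium queries, 50% match
--     elif len(query_words) >= 3:
--         return match_ratio >= 0.5 or matches >= 2
--     # For short queries, at least one word must match
--     else:
--         return matches >= 1
-- ===== SOURCE B (Python) =====
-- # Single-pass tokenizer + flattened keyword->category index + closed-form thresholds.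
--
-- _STOP = {'the', 'a', 'an', 'for', 'with', 'and', 'in', 'on', 'at', 'by', 'of', 'to'}
--
-- _CATEGORIES = {
--     'keyboard': ['keyboard', 'keypad'],
--     'mouse': ['mouse', 'mice'],
--     'speaker': ['speaker', 'soundbar', 'audio'],
--     'headphone': ['headphone', 'headset', 'earphone', 'airpod', 'earbud', 'tws'],
--     'charger': ['charger', 'adapter', 'power bank'],
--     'cable': ['cable', 'wire', 'cord', 'type-c', 'usb'],
--     'laptop': ['laptop', 'macbook', 'notebook'],
--     'phone': ['phone', 'mobile', 'smartphone'],
--     'milk': ['milk', 'dairy', 'doodh'],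
--     'bread': ['bread', 'loaf'],
--     'egg': ['egg', 'eggs', 'anda'],
--     'rice': ['rice', 'chawal'],
--     'coffee': ['coffee'],
--     'tea': ['tea', 'chai'],
-- }
--
-- # Flat (keyword, category) index: one scan of this list classifies a text.
-- _KEYWORD_CATS = [(kw, cat) for cat, kws in _CATEGORIES.items() for kw in [cat] + kws]
--
--
-- def _category_hits(text):
--     """Set of category names whose keywords occur as substrings of text."""
--     return {cat for kw, cat in _KEYWORD_CATS if kw in text}
--
--
-- def _tokens(text):
--     """One left-to-right scan: split on whitespace/','/'|'/'-' and keep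
--     significant words (longer than 1 char, not a stop word)."""
--     words = []
--     cur = ''
--     for ch in text:
--         if ch.isspace() or ch in ',|-':
--             if len(cur) > 1 and cur not in _STOP:
--                 words.append(cur)
--             cur = ''
--         else:
--             cur += ch
--     if len(cur) > 1 and cur not in _STOP:
--         words.append(cur)
--     return words
--
--
-- def is_relevant_result(title: str, query: str) -> bool:
--     title_lower = title.lower()
--     query_lower = query.lower()
--
--     words = _tokens(query_lower)
--     if not words:
--         return False
--
--     # Hard category filter: the query names categories, the title names only
--     # other categories -> irrelevant.
--     query_cats = _category_hits(query_lower)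
--     title_cats = _category_hits(title_lower)
--     if query_cats and query_cats.isdisjoint(title_cats) and not title_cats <= query_cats:
--         return False
--
--     # Word-overlap verdict: A's ratio/absolute rules collapse to one
--     # closed-form threshold on the number of matching words.
--     matches = sum(1 for w in words if w in title_lower)
--     need = 1 if len(words) <= 2 else 2 if len(words) <= 6 else 3
--     return matches >= need
-- ===== Notes on version B (the rewrite author's own statement) =====
-- stated objective: alternative
-- what changed: A's staged replace/replace/replace/split/filter tokenization becomes one left-to-right character scan with an accumulator, the three nested per-category loops with break/early-return become one scan of a flattened (keyword, category) index whose two resulting sets are combined with set logic (nonempty/disjoint/subset), the no-op brand loop is dropped, and the float-ratio verdict is replaced by a closed-form integer threshold (1, 2 or 3 matching words for <=2, <=6, >=7 query words). (same asymptotic cost; trades A's library-staged passes for explicit single passes)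
import Mathlib
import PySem

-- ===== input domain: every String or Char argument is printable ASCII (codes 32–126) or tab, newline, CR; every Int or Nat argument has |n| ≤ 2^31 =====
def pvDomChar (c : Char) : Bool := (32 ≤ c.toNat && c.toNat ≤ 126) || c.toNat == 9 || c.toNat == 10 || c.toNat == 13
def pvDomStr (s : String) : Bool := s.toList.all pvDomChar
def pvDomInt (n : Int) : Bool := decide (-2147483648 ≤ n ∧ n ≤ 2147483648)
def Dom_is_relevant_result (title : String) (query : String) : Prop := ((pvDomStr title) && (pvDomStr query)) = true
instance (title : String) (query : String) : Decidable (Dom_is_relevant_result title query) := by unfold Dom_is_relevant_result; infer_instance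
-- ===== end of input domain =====

-- B replaces A's staged replace/replace/replace/split/filter tokenization by ONE left-to-right
-- character scan, A's nested per-category loops by one scan of a flattened (keyword, category)
-- index feeding set logic, and A's float-ratio verdict by a closed-form integer threshold
-- (1/2/3 matching words for ≤2 / ≤6 / ≥7 query words); objective: alternative (same cost). Equal on all inputs.

-- the category table (identical literal in both Pythons)
def pvCats : List (String × List String) :=
  [("keyboard", ["keyboard", "keypad"]),
   ("mouse", ["mouse", "mice"]),
   ("speaker", ["speaker", "soundbar", "audio"]),
   ("headphone", ["headphone", "headset", "earphone", "airpod", "earbud", "tws"]),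
   ("charger", ["charger", "adapter", "power bank"]),
   ("cable", ["cable", "wire", "cord", "type-c", "usb"]),
   ("laptop", ["laptop", "macbook", "notebook"]),
   ("phone", ["phone", "mobile", "smartphone"]),
   ("milk", ["milk", "dairy", "doodh"]),
   ("bread", ["bread", "loaf"]),
   ("egg", ["egg", "eggs", "anda"]),
   ("rice", ["rice", "chawal"]),
   ("coffee", ["coffee"]),
   ("tea", ["tea", "chai"])]

-- the stop-word set (identical literal in both Pythons)
def pvStop : List String :=
  ["the", "a", "an", "for", "with", "and", "in", "on", "at", "by", "of", "to"]

-- ===== PORT A =====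
-- A's query_words line: replace ','/'|'/'-' by spaces, split on whitespace, filter
def pvWords (query_lower : String) : List String :=
  (PySem.Str.split₀
    (PySem.Str.replace (PySem.Str.replace (PySem.Str.replace query_lower "," " ") "|" " ") "-" " ")).filter
    (fun w => !pvStop.contains w && 1 < PySem.Str.len w)

-- categories[cat]: total here because every looked-up cat is a key of pvCats
def pvKws (cat : String) : List String :=
  ((pvCats.find? (fun p => p.1 == cat)).map (fun p => p.2)).getD []

-- stage 1 of A: returns true iff A does NOT 'return False' there
def pvProceedA (query_lower : String) (title_lower : String) : Bool :=
  let query_categories :=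
    pvCats.foldl (fun acc p =>
      if (p.1 :: p.2).any (fun kw => PySem.Str.isIn kw query_lower) then acc ++ [p.1] else acc) []
  if query_categories.isEmpty then true
  else
    let is_in_cat := query_categories.any (fun cat =>
      (cat :: pvKws cat).any (fun kw => PySem.Str.isIn kw title_lower))
    if is_in_cat then true
    else !(pvCats.any (fun p =>
      !query_categories.contains p.1 &&
        (p.1 :: p.2).any (fun kw => PySem.Str.isIn kw title_lower)))

def is_relevant_result (title : String) (query : String) : Bool :=
  let title_lower := PySem.Str.lower title
  let query_lower := PySem.Str.lower query
  let query_words := pvWords query_lower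
  if query_words.isEmpty then false
  else if !(pvProceedA query_lower title_lower) then false
  else
    -- A's brand loop has body 'pass': a no-op, nothing to port
    let mcount := query_words.foldl (fun m w => if PySem.Str.isIn w title_lower then m + 1 else m) (0 : Int)
    let n : Int := query_words.length
    -- float comparisons matches/n >= 0.3 / 0.5 written as the exact integer comparisons
    if 5 ≤ query_words.length then decide (3 * n ≤ 10 * mcount) || decide (3 ≤ mcount)
    else if 3 ≤ query_words.length then decide (n ≤ 2 * mcount) || decide (2 ≤ mcount)
    else decide (1 ≤ mcount)

-- ===== PORT B =====
-- the flat (keyword, category) index _KEYWORD_CATS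
def pvKeywordCats : List (String × String) :=
  pvCats.flatMap (fun p => (p.1 :: p.2).map (fun kw => (kw, p.1)))

-- _category_hits(text)
def pvHits (text : String) : PySem.Set String :=
  PySem.Set.ofList ((pvKeywordCats.filter (fun kc => PySem.Str.isIn kc.1 text)).map (fun kc => kc.2))

-- the scanner's separator test: ch.isspace() or ch in ',|-'
def pvSep (c : Char) : Bool := PySem.Chars.isspace c || [',', '|', '-'].contains c

-- emit cur into words if it is significant (the two 'if len(cur) > 1 and cur not in _STOP' lines)
def pvFlush (cur : List Char) (acc : List String) : List String :=
  if 1 < cur.length && !pvStop.contains (String.ofList cur) then acc ++ [String.ofList cur] else acc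

-- _tokens' loop: one pass over the characters
def pvScan : List Char → List Char → List String → List String
  | [], cur, acc => pvFlush cur acc
  | c :: rest, cur, acc =>
    if pvSep c then pvScan rest [] (pvFlush cur acc)
    else pvScan rest (cur ++ [c]) acc

def is_relevant_result_alt (title : String) (query : String) : Bool :=
  let title_lower := PySem.Str.lower title
  let query_lower := PySem.Str.lower query
  let words := pvScan query_lower.toList [] []
  if words.isEmpty then false
  else
    let query_cats := pvHits query_lower
    let title_cats := pvHits title_lower
    if !query_cats.isEmpty && PySem.Set.isdisjoint query_cats title_cats
        && !(PySem.Set.issubset title_cats query_cats) then false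
    else
      let mcount := (words.filter (fun w => PySem.Str.isIn w title_lower)).length
      let need := if words.length ≤ 2 then 1 else if words.length ≤ 6 then 2 else 3
      decide (need ≤ mcount)

-- ===== PRECONDITION & SPEC =====
def Spec_is_relevant_result (title : String) (query : String) (out : Bool) : Prop := out = is_relevant_result_alt title query
instance (title : String) (query : String) (out : Bool) : Decidable (Spec_is_relevant_result title query out) := by unfold Spec_is_relevant_result; infer_instance

-- ===== CLAIM (what is proved, stated in full; the proofs are below) =====
def Claim_equal_is_relevant_result : Prop := ∀ (title : String) (query : String), Dom_is_relevant_result title query → Spec_is_relevant_result title query (is_relevant_result title query)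

-- ===== LEMMAS AND PROOFS =====

-- A's three replaces map ','/'|'/'-' to ' '
def pvMapSep (c : Char) : Char := if [',', '|', '-'].contains c then ' ' else c

-- replacing one single character by another is a character map
theorem pv_replace_go_single (o n : Char) :
    ∀ (cs : List Char) (acc : List Char) (fuel : Nat), cs.length ≤ fuel →
      PySem.Chars.replace.go [o] [n] fuel cs acc
        = acc.reverse ++ cs.map (fun c => if c = o then n else c) := by
  intro cs
  induction cs with
  | nil =>
    intro acc fuel _
    cases fuel <;> simp [PySem.Chars.replace.go]
  | cons c t ih =>
    intro acc fuel hf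
    cases fuel with
    | zero => simp at hf
    | succ f =>
      simp only [PySem.Chars.replace.go]
      by_cases hc : c = o
      · subst hc
        rw [if_pos (by simp [List.isPrefixOf])]
        have hd : List.drop [c].length (c :: t) = t := by simp
        rw [hd, ih _ f (by simpa using hf)]
        simp
      · rw [if_neg (by simp [List.isPrefixOf]; exact fun h => hc h.symm)]
        rw [ih _ f (by simpa using hf)]
        simp [hc]

theorem pv_replace_single (o n : Char) (cs : List Char) :
    PySem.Chars.replace cs [o] [n] = cs.map (fun c => if c = o then n else c) := by
  simp [PySem.Chars.replace, pv_replace_go_single o n cs [] cs.length le_rfl]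

-- the three replaces compose into pvMapSep
theorem pv_replace3 (cs : List Char) :
    ((cs.map (fun c => if c = ',' then ' ' else c)).map (fun c => if c = '|' then ' ' else c)).map
        (fun c => if c = '-' then ' ' else c) = cs.map pvMapSep := by
  simp only [List.map_map]
  apply List.map_congr_left
  intro c _
  simp only [Function.comp, pvMapSep, List.contains_eq_mem]
  by_cases h1 : c = ',' <;> by_cases h2 : c = '|' <;> by_cases h3 : c = '-' <;>
    simp_all

-- split₀.go's accumulator extracts
theorem pv_split_go_acc (cs : List Char) :
    ∀ (cur : List Char) (acc : List (List Char)),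
      PySem.Chars.split₀.go cs cur acc = acc.reverse ++ PySem.Chars.split₀.go cs cur [] := by
  induction cs with
  | nil =>
    intro cur acc
    simp only [PySem.Chars.split₀.go]
    by_cases h : cur.isEmpty <;> simp [h]
  | cons c rest ih =>
    intro cur acc
    simp only [PySem.Chars.split₀.go]
    by_cases hs : PySem.Chars.isspace c
    · by_cases h : cur.isEmpty
      · simp only [hs, h, if_true]
        exact ih [] acc
      · simp only [hs, h, if_true, Bool.false_eq_true, if_false]
        rw [ih [] (cur.reverse :: acc), ih [] [cur.reverse]]
        simp
    · simp only [hs, Bool.false_eq_true, if_false]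
      exact ih (c :: cur) acc

theorem pv_isspace_mapSep (c : Char) : PySem.Chars.isspace (pvMapSep c) = pvSep c := by
  unfold pvMapSep pvSep
  by_cases h : [',', '|', '-'].contains c
  · rw [if_pos h, h]
    simp [PySem.Chars.isspace]
  · rw [if_neg h]
    simp only [Bool.not_eq_true] at h
    rw [h]
    simp

-- the flush lines agree with A's filter on a single word
theorem pv_flush_eq (cur : List Char) (acc : List String) :
    pvFlush cur acc
      = acc ++ List.filter (fun w => !pvStop.contains w && decide (1 < PySem.Str.len w)) [String.ofList cur] := by
  have hlen : PySem.Str.len (String.ofList cur) = (cur.length : Int) := by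
    rw [PySem.Str.len_eq, String.toList_ofList]
  unfold pvFlush
  by_cases hl : 1 < cur.length <;> by_cases hst : pvStop.contains (String.ofList cur) = true <;>
    simp [hl, hst, List.filter, hlen, List.contains_eq_mem] at * <;> simp [hst]

-- B's one-pass scanner produces exactly A's filtered split of the separator-mapped string
theorem pv_scan_eq (cs : List Char) :
    ∀ (cur : List Char) (acc : List String),
      pvScan cs cur acc
        = acc ++ ((PySem.Chars.split₀.go (cs.map pvMapSep) cur.reverse []).map String.ofList).filter
            (fun w => !pvStop.contains w && 1 < PySem.Str.len w) := by
  induction cs with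
  | nil =>
    intro cur acc
    simp only [List.map_nil, PySem.Chars.split₀.go, pvScan]
    by_cases h : cur = []
    · subst h
      simp [pvFlush]
    · rw [if_neg (by simp [h])]
      rw [pv_flush_eq]
      simp
  | cons c rest ih =>
    intro cur acc
    simp only [List.map_cons, pvScan, PySem.Chars.split₀.go, pv_isspace_mapSep]
    by_cases hs : pvSep c
    · simp only [hs, if_true]
      rw [ih [] (pvFlush cur acc), pv_flush_eq]
      by_cases h : cur = []
      · subst h
        simp
      · rw [if_neg (by simp [h])]
        simp only [List.reverse_reverse]
        rw [pv_split_go_acc (rest.map pvMapSep) [] [cur]]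
        simp [List.filter_cons]
        split_ifs <;> simp
    · simp only [hs, Bool.false_eq_true, if_false]
      have hmap : pvMapSep c = c := by
        unfold pvMapSep
        rw [if_neg]
        intro hc
        simp only [List.contains_eq_mem, List.mem_cons, List.not_mem_nil, or_false,
          decide_eq_true_eq] at hc
        unfold pvSep at hs
        simp only [Bool.or_eq_true, Bool.not_eq_true, List.contains_eq_mem, List.mem_cons,
          List.not_mem_nil, or_false, decide_eq_true_eq, not_or] at hs
        rcases hc with h | h | h <;> exact absurd h (by tauto)
      rw [hmap, ih (cur ++ [c]) acc]
      simp

-- tokenization: B's words = A's query_words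
theorem pv_words_eq (ql : String) : pvScan ql.toList [] [] = pvWords ql := by
  rw [pv_scan_eq]
  unfold pvWords
  have hR : (PySem.Str.replace (PySem.Str.replace (PySem.Str.replace ql "," " ") "|" " ") "-" " ").toList
      = ql.toList.map pvMapSep := by
    simp only [PySem.Str.toList_replace]
    have h1 : ("," : String).toList = [','] := rfl
    have h2 : ("|" : String).toList = ['|'] := rfl
    have h3 : ("-" : String).toList = ['-'] := rfl
    have h4 : (" " : String).toList = [' '] := rfl
    rw [h1, h2, h3, h4, pv_replace_single, pv_replace_single, pv_replace_single, pv_replace3]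
  have hsplit : PySem.Str.split₀ (PySem.Str.replace (PySem.Str.replace (PySem.Str.replace ql "," " ") "|" " ") "-" " ")
      = (PySem.Chars.split₀ (ql.toList.map pvMapSep)).map String.ofList := by
    have := PySem.Str.split₀_map_toList (PySem.Str.replace (PySem.Str.replace (PySem.Str.replace ql "," " ") "|" " ") "-" " ")
    rw [hR] at this
    rw [← this, List.map_map]
    rw [show String.ofList ∘ String.toList = id from funext (fun s => String.ofList_toList)]
    simp
  rw [hsplit]
  rfl

-- membership in B's category-hit set
theorem pv_mem_hits (text : String) (x : String) :
    x ∈ pvHits text ↔ ∃ p ∈ pvCats, p.1 = x ∧ (p.1 :: p.2).any (fun kw => PySem.Str.isIn kw text) = true := by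
  unfold pvHits pvKeywordCats
  rw [PySem.Set.mem_ofList]
  simp only [List.mem_map, List.mem_filter, List.mem_flatMap, List.any_eq_true]
  constructor
  · rintro ⟨kc, ⟨⟨p, hp, ⟨kw, hkw, rfl⟩⟩, hin⟩, hx⟩
    exact ⟨p, hp, hx, kw, hkw, hin⟩
  · rintro ⟨p, hp, hx, kw, hkw, hin⟩
    exact ⟨(kw, p.1), ⟨⟨p, hp, ⟨kw, hkw, rfl⟩⟩, hin⟩, hx⟩

-- stage 1: A's loops = B's set logic
theorem pv_stage1_eq (ql tl : String) :
    pvProceedA ql tl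
      = !(!(pvHits ql).isEmpty && PySem.Set.isdisjoint (pvHits ql) (pvHits tl)
          && !(PySem.Set.issubset (pvHits tl) (pvHits ql))) := by
  have hK : ∀ p ∈ pvCats, pvKws p.1 = p.2 := by
    intro p hp
    fin_cases hp <;> rfl
  have hNodup : (pvCats.map (fun p => p.1)).Nodup := by simp [pvCats]
  have hInj : ∀ p ∈ pvCats, ∀ q ∈ pvCats, p.1 = q.1 → p = q :=
    fun p hp q hq he => List.inj_on_of_nodup_map hNodup hp hq he
  unfold pvProceedA
  rw [PySem.List.foldl_append_if]
  simp only [List.nil_append]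
  set qf : String × List String → Bool := fun p => (p.1 :: p.2).any (fun kw => PySem.Str.isIn kw ql) with hqf
  set tf : String × List String → Bool := fun p => (p.1 :: p.2).any (fun kw => PySem.Str.isIn kw tl) with htf
  set Q : List String := (pvCats.filter qf).map (fun p => p.1) with hQdef
  have hmemQ : ∀ p ∈ pvCats, (p.1 ∈ Q ↔ qf p = true) := by
    intro p hp
    rw [hQdef]
    simp only [List.mem_map, List.mem_filter]
    constructor
    · rintro ⟨q, ⟨hq, hf⟩, he⟩
      rw [hInj p hp q hq he.symm]
      exact hf
    · intro h
      exact ⟨p, ⟨hp, h⟩, rfl⟩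
  have hmemHq : ∀ x, x ∈ pvHits ql ↔ ∃ p ∈ pvCats, p.1 = x ∧ qf p = true := pv_mem_hits ql
  have hmemHt : ∀ x, x ∈ pvHits tl ↔ ∃ p ∈ pvCats, p.1 = x ∧ tf p = true := pv_mem_hits tl
  have h1 : (pvHits ql).isEmpty = Q.isEmpty := by
    rw [Bool.eq_iff_iff, List.isEmpty_iff, List.isEmpty_iff, List.eq_nil_iff_forall_not_mem,
      List.eq_nil_iff_forall_not_mem]
    constructor
    · intro h x hx
      rw [hQdef] at hx
      obtain ⟨p, hpf, he⟩ := List.mem_map.mp hx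
      have hp := List.mem_filter.mp hpf
      exact h x ((hmemHq x).mpr ⟨p, hp.1, he, hp.2⟩)
    · intro h x hx
      obtain ⟨p, hp, he, hf⟩ := (hmemHq x).mp hx
      exact h x (he ▸ (hmemQ p hp).mpr hf)
  have h2 : PySem.Set.isdisjoint (pvHits ql) (pvHits tl)
      = !(Q.any (fun cat => (cat :: pvKws cat).any (fun kw => PySem.Str.isIn kw tl))) := by
    unfold PySem.Set.isdisjoint
    congr 1
    rw [Bool.eq_iff_iff]
    simp only [List.any_eq_true, PySem.Set.contains, List.contains_eq_mem, decide_eq_true_eq]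
    constructor
    · rintro ⟨x, hxq, hxt⟩
      obtain ⟨p, hp, he, hf⟩ := (hmemHq x).mp hxq
      obtain ⟨p', hp', he', hf'⟩ := (hmemHt x).mp hxt
      have hpp : p = p' := hInj p hp p' hp' (he.trans he'.symm)
      subst hpp
      refine ⟨p.1, (hmemQ p hp).mpr hf, ?_⟩
      rw [hK p hp]
      simpa [htf, List.any_eq_true] using hf'
    · rintro ⟨cat, hcat, hg⟩
      rw [hQdef] at hcat
      obtain ⟨p, hpf, he⟩ := List.mem_map.mp hcat
      obtain ⟨hp, hf⟩ := List.mem_filter.mp hpf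
      subst he
      rw [hK p hp] at hg
      exact ⟨p.1, (hmemHq p.1).mpr ⟨p, hp, rfl, hf⟩,
        (hmemHt p.1).mpr ⟨p, hp, rfl, by simpa [htf, List.any_eq_true] using hg⟩⟩
  have h3 : PySem.Set.issubset (pvHits tl) (pvHits ql)
      = !(pvCats.any (fun p => !Q.contains p.1 && tf p)) := by
    unfold PySem.Set.issubset
    rw [Bool.eq_iff_iff]
    simp only [List.all_eq_true, PySem.Set.contains, List.contains_eq_mem, decide_eq_true_eq,
      Bool.not_eq_true', List.any_eq_false]
    constructor
    · intro h p hp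
      by_cases hq : p.1 ∈ Q
      · simp [hq]
      · have htfp : tf p = false := by
          rw [← Bool.not_eq_true]
          intro hf
          obtain ⟨q, hqc, he, hfq'⟩ := (hmemHq p.1).mp (h p.1 ((hmemHt p.1).mpr ⟨p, hp, rfl, hf⟩))
          have hqp : q = p := hInj q hqc p hp he
          subst hqp
          exact hq ((hmemQ q hp).mpr hfq')
        simp [htfp]
    · intro h x hxt
      obtain ⟨p, hp, he, hf⟩ := (hmemHt x).mp hxt
      have hc := h p hp
      have hq : p.1 ∈ Q := by
        by_contra hq
        simp [hq, hf] at hc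
      exact (hmemHq x).mpr ⟨p, hp, he, (hmemQ p hp).mp hq⟩
  rw [h1, h2, h3]
  cases hb1 : Q.isEmpty <;>
    cases hb2 : Q.any (fun cat => (cat :: pvKws cat).any (fun kw => PySem.Str.isIn kw tl)) <;>
      cases hb3 : pvCats.any (fun p => !Q.contains p.1 && tf p) <;> simp [hb1, hb2, hb3]


-- verdict: A's ratio/absolute rules = B's closed-form threshold
theorem pv_verdict_eq (words : List String) (tl : String) :
    (if 5 ≤ words.length then
        decide (3 * (words.length : Int) ≤ 10 * ((words.countP (fun w => PySem.Str.isIn w tl)) : Int))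
          || decide ((3 : Int) ≤ (words.countP (fun w => PySem.Str.isIn w tl) : Int))
      else if 3 ≤ words.length then
        decide ((words.length : Int) ≤ 2 * ((words.countP (fun w => PySem.Str.isIn w tl)) : Int))
          || decide ((2 : Int) ≤ (words.countP (fun w => PySem.Str.isIn w tl) : Int))
      else decide ((1 : Int) ≤ (words.countP (fun w => PySem.Str.isIn w tl) : Int)))
    = decide ((if words.length ≤ 2 then 1 else if words.length ≤ 6 then 2 else 3)
        ≤ ((words.filter (fun w => PySem.Str.isIn w tl)).length)) := by
  have hfil : (words.filter (fun w => PySem.Str.isIn w tl)).length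
      = words.countP (fun w => PySem.Str.isIn w tl) := List.countP_eq_length_filter.symm
  rw [hfil]
  rcases lt_or_ge words.length 3 with h3 | h3
  · rw [if_neg (by omega), if_neg (by omega), if_pos (by omega), Bool.eq_iff_iff]
    simp only [decide_eq_true_eq]
    omega
  · rcases lt_or_ge words.length 5 with h5 | h5
    · rw [if_neg (by omega), if_pos h3, if_neg (by omega), if_pos (by omega), Bool.eq_iff_iff]
      simp only [Bool.or_eq_true, decide_eq_true_eq]
      omega
    · rcases Nat.lt_or_ge words.length 7 with h6 | h6
      · rw [if_pos h5, if_neg (by omega), if_pos (by omega), Bool.eq_iff_iff]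
        simp only [Bool.or_eq_true, decide_eq_true_eq]
        omega
      · rw [if_pos h5, if_neg (by omega), if_neg (by omega), Bool.eq_iff_iff]
        simp only [Bool.or_eq_true, decide_eq_true_eq]
        omega

-- ===== VERDICT (by name: the statement is the Claim_ definition above) =====
theorem is_relevant_result_spec : Claim_equal_is_relevant_result := by
  intro title query _
  unfold Spec_is_relevant_result is_relevant_result is_relevant_result_alt
  simp only [pv_words_eq, pv_stage1_eq, Bool.not_not, PySem.List.foldl_count_if, zero_add]
  rw [pv_verdict_eq]
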